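-- pv_equiv track=rewrite | github.com/StefanNede/BIO-Practice | codeforces/first_contest/dValleys.py | solve
-- ===== SOURCE A (Python) =====
-- def allSame(arr, l, r):
--     if len(arr[l:r+1]) == 1:
--         return True
--     el = arr[l]
--     for e in arr[l:r+1]:
--         if e != el: return False
--     return True
--
-- def solve(arr):
--     if len(arr) == 1: return "YES"
--     l = 0
--     r = 0
--     count = 0
--     for l in range(len(arr)):
--         for r in range(l, len(arr)):
--                 if ((l <= r and r <= len(arr)-1) and allSame(arr, l, r)) and (l == 0 or arr[l-1]>arr[l]) and (r == len(arr)-1 or arr[r] < arr[r+1]):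
--                     # if count is 1 then return "NO"
--                     if count == 1: return "NO"
--                     else:
--                         count += 1
--
--     if count == 0: return "NO"
--     else: return "YES"
-- ===== SOURCE B (Python) =====
-- def solve(arr):
--     n = len(arr)
--     count = 0
--     i = 0
--     while i < n:
--         j = i
--         while j + 1 < n and arr[j + 1] == arr[i]:
--             j += 1
--         if (i == 0 or arr[i - 1] > arr[i]) and (j == n - 1 or arr[j] < arr[j + 1]):
--             count += 1
--             if count == 2:
--                 return "NO"
--         i = j + 1
--     return "YES" if count == 1 else "NO"
-- ===== Notes on version B (the rewrite author's own statement) =====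
-- stated objective: faster
-- what changed: A enumerates all O(n^2) subarrays and re-scans each with allSame to find equal-value valley segments; B makes one linear pass over the maximal equal-value runs, counting runs whose neighbours are strictly greater, with early exit at the second valley.
import Mathlib
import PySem

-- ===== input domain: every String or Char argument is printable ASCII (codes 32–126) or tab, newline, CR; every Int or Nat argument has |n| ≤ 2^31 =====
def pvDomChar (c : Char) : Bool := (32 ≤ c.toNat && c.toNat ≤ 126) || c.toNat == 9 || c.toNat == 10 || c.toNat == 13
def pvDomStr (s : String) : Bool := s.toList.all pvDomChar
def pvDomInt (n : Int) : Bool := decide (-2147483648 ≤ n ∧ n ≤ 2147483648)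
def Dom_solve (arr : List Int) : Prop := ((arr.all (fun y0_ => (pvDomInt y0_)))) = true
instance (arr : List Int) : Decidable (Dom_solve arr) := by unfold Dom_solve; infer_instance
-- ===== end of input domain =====

-- B replaces A's O(n^3) scan over all subarrays by a single linear pass over the maximal
-- equal-value runs, counting valley runs with early exit (objective: faster, asymptotic).

-- ===== PORT A =====
-- allSame(arr, l, r): all calls have 0 ≤ l ≤ r < len(arr), so arr[l] is in range
-- (pyGetD with default 0 is exact there).
def allSame (arr : List Int) (l r : Int) : Bool :=
  if (PySem.List.slice arr (some l) (some (r + 1))).length == 1 then true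
  else
    let el := PySem.List.pyGetD arr l 0
    (PySem.List.slice arr (some l) (some (r + 1))).all (fun e => e == el)

-- the early 'return "NO"' inside the double loop is carried as an Except-state fold
def solve (arr : List Int) : String :=
  if arr.length == 1 then "YES"
  else
    let n : Int := (arr.length : Int)
    let res : Except String Int :=
      (PySem.List.pyRange 0 n 1).foldl (fun st l =>
        match st with
        | .error s => .error s
        | .ok count =>
          (PySem.List.pyRange l n 1).foldl (fun st2 r =>
            match st2 with
            | .error s => .error s
            | .ok c =>
              if ((decide (l ≤ r) && decide (r ≤ n - 1)) && allSame arr l r)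
                  && (l == 0 || decide (PySem.List.pyGetD arr (l - 1) 0 > PySem.List.pyGetD arr l 0))
                  && (r == n - 1 || decide (PySem.List.pyGetD arr r 0 < PySem.List.pyGetD arr (r + 1) 0)) then
                if c == 1 then .error "NO" else .ok (c + 1)
              else .ok c) (Except.ok count)) (Except.ok 0)
    match res with
    | .error s => s
    | .ok count => if count == 0 then "NO" else "YES"

-- ===== PORT B =====
-- inner while loop of Source B: extend j to the end of the equal-value run containing i
-- (indices are in range wherever python reads arr, so getD 0 is exact)
def runJ (arr : List Int) (i j : Nat) : Nat :=
  if h : j + 1 < arr.length ∧ arr.getD (j + 1) 0 = arr.getD i 0 then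
    runJ arr i (j + 1)
  else j
termination_by arr.length - j
decreasing_by omega

theorem runJ_ge (arr : List Int) (i j : Nat) : j ≤ runJ arr i j := by
  unfold runJ
  split
  · exact le_trans (Nat.le_succ j) (runJ_ge arr i (j + 1))
  · exact le_refl j
termination_by arr.length - j
decreasing_by rename_i h; omega

-- outer while loop of Source B
def bLoop (arr : List Int) (count : Int) (i : Nat) : String :=
  if h : i < arr.length then
    let j := runJ arr i i
    if (i == 0 || decide (arr.getD (i - 1) 0 > arr.getD i 0))
        && (j == arr.length - 1 || decide (arr.getD j 0 < arr.getD (j + 1) 0)) then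
      let count := count + 1
      if count == 2 then "NO" else bLoop arr count (j + 1)
    else bLoop arr count (j + 1)
  else if count == 1 then "YES" else "NO"
termination_by arr.length - i
decreasing_by
  · have := runJ_ge arr i i; omega
  · have := runJ_ge arr i i; omega

def solve_alt (arr : List Int) : String := bLoop arr 0 0

-- ===== PRECONDITION & SPEC =====
def Spec_solve (arr : List Int) (out : String) : Prop := out = solve_alt arr
instance (arr : List Int) (out : String) : Decidable (Spec_solve arr out) := by unfold Spec_solve; infer_instance

-- ===== CLAIM (what is proved, stated in full; the proofs are below) =====
def Claim_equal_solve : Prop := ∀ (arr : List Int), Dom_solve arr → Spec_solve arr (solve arr)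

-- ===== LEMMAS AND PROOFS =====

-- V arr i: i starts a maximal equal-value run that is a strict valley
def V (arr : List Int) (i : Nat) : Bool :=
  (i == 0 || decide (arr.getD (i - 1) 0 > arr.getD i 0))
    && (runJ arr i i == arr.length - 1 || decide (arr.getD (runJ arr i i) 0 < arr.getD (runJ arr i i + 1) 0))

-- number of valley run-starts at positions ≥ i
def C (arr : List Int) (i : Nat) : Nat :=
  ((List.range' i (arr.length - i)).filter (fun l => V arr l)).length

theorem runJ_lt (arr : List Int) (i j : Nat) (h : j < arr.length) : runJ arr i j < arr.length := by
  unfold runJ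
  split
  · exact runJ_lt arr i (j + 1) (by omega)
  · exact h
termination_by arr.length - j
decreasing_by rename_i h'; omega

theorem runJ_all (arr : List Int) (i j : Nat) (h0 : arr.getD j 0 = arr.getD i 0) :
    ∀ k, j ≤ k → k ≤ runJ arr i j → arr.getD k 0 = arr.getD i 0 := by
  intro k hk1 hk2
  unfold runJ at hk2
  split at hk2
  · rename_i h
    rcases Nat.eq_or_lt_of_le hk1 with rfl | hlt
    · exact h0
    · exact runJ_all arr i (j + 1) h.2 k hlt hk2
  · have : k = j := le_antisymm hk2 hk1
    subst this; exact h0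
termination_by arr.length - j
decreasing_by rename_i _h _; omega

theorem runJ_next (arr : List Int) (i j : Nat) (h : runJ arr i j + 1 < arr.length) :
    arr.getD (runJ arr i j + 1) 0 ≠ arr.getD i 0 := by
  by_cases hc : j + 1 < arr.length ∧ arr.getD (j + 1) 0 = arr.getD i 0
  · rw [runJ, dif_pos hc] at h ⊢
    exact runJ_next arr i (j + 1) h
  · rw [runJ, dif_neg hc] at h ⊢
    intro he
    exact hc ⟨h, he⟩
termination_by arr.length - j
decreasing_by omega

theorem runJ_max (arr : List Int) (i : Nat) : ∀ (j R : Nat), j ≤ R → R < arr.length →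
    (∀ k, j ≤ k → k ≤ R → arr.getD k 0 = arr.getD i 0) → R ≤ runJ arr i j := by
  have main : ∀ (d j R : Nat), R - j ≤ d → j ≤ R → R < arr.length →
      (∀ k, j ≤ k → k ≤ R → arr.getD k 0 = arr.getD i 0) → R ≤ runJ arr i j := by
    intro d
    induction d with
    | zero =>
      intro j R hd hjR _ _
      have : j = R := by omega
      subst this
      exact runJ_ge arr i j
    | succ d ih =>
      intro j R hd hjR hR hall
      rcases Nat.eq_or_lt_of_le hjR with rfl | hlt
      · exact runJ_ge arr i j
      · have h1 : j + 1 < arr.length := by omega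
        have h2 : arr.getD (j + 1) 0 = arr.getD i 0 := hall (j + 1) (by omega) (by omega)
        rw [runJ, dif_pos ⟨h1, h2⟩]
        exact ih (j + 1) R (by omega) hlt hR (fun k hk1 hk2 => hall k (by omega) hk2)
  intro j R hjR hR hall
  exact main (R - j) j R (le_refl _) hjR hR hall

-- counting version of bLoop's traversal
def W (arr : List Int) (i : Nat) : Nat :=
  if h : i < arr.length then
    (if V arr i then 1 else 0) + W arr (runJ arr i i + 1)
  else 0
termination_by arr.length - i
decreasing_by have := runJ_ge arr i i; omega

theorem V_false_inside (arr : List Int) (i l : Nat) (hil : i + 1 ≤ l)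
    (hle : l ≤ runJ arr i i) : V arr l = false := by
  have h1 : arr.getD (l - 1) 0 = arr.getD i 0 :=
    runJ_all arr i i rfl (l - 1) (by omega) (by omega)
  have h2 : arr.getD l 0 = arr.getD i 0 :=
    runJ_all arr i i rfl l (by omega) hle
  have hl0 : (l == 0) = false := by simp; omega
  have hgt : ¬ (arr.getD (l - 1) 0 > arr.getD l 0) := by rw [h1, h2]; exact lt_irrefl _
  unfold V
  rw [hl0, decide_eq_false hgt]
  rfl

theorem C_step (arr : List Int) (i : Nat) (hi : i < arr.length) :
    C arr i = (if V arr i then 1 else 0) + C arr (runJ arr i i + 1) := by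
  have he1 : i ≤ runJ arr i i := runJ_ge arr i i
  have he2 : runJ arr i i < arr.length := runJ_lt arr i i hi
  set n := arr.length with hn
  set e := runJ arr i i with hev
  unfold C
  have hsz : n - i = ((e - i) + (n - (e + 1))) + 1 := by omega
  rw [hsz, List.range'_succ]
  have hsplit : List.range' (i + 1) ((e - i) + (n - (e + 1))) =
      List.range' (i + 1) (e - i) ++ List.range' (i + 1 + (e - i)) (n - (e + 1)) := by
    have := @List.range'_append (i + 1) (e - i) (n - (e + 1)) 1
    simp only [one_mul] at this
    exact this.symm
  have harg : i + 1 + (e - i) = e + 1 := by omega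
  rw [harg] at hsplit
  rw [List.filter_cons, hsplit, List.filter_append]
  have hmid : (List.range' (i + 1) (e - i)).filter (fun l => V arr l) = [] := by
    rw [List.filter_eq_nil_iff]
    intro l hl
    rw [List.mem_range'] at hl
    simp [V_false_inside arr i l (by omega) (by omega)]
  rw [hmid]
  rw [hn]
  by_cases hv : V arr i
  · simp [hv]
    omega
  · simp [hv]

theorem W_eq_C (arr : List Int) : ∀ (d i : Nat), arr.length - i ≤ d → W arr i = C arr i := by
  intro d
  induction d with
  | zero =>
    intro i hd
    rw [W, dif_neg (by omega)]
    unfold C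
    have : arr.length - i = 0 := by omega
    rw [this]
    rfl
  | succ d ih =>
    intro i hd
    by_cases hi : i < arr.length
    · rw [W, dif_pos hi, C_step arr i hi]
      have := runJ_ge arr i i
      rw [ih (runJ arr i i + 1) (by omega)]
    · rw [W, dif_neg hi]
      unfold C
      have : arr.length - i = 0 := by omega
      rw [this]
      rfl

theorem bLoop_eq (arr : List Int) : ∀ (d i : Nat) (c : Int), arr.length - i ≤ d →
    (c = 0 ∨ c = 1) →
    bLoop arr c i = if 2 ≤ c + (W arr i : Int) then "NO"
      else if c + (W arr i : Int) = 1 then "YES" else "NO" := by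
  intro d
  induction d with
  | zero =>
    intro i c hd hc
    rw [bLoop, dif_neg (by omega), W, dif_neg (by omega)]
    rcases hc with rfl | rfl <;> simp
  | succ d ih =>
    intro i c hd hc
    by_cases hi : i < arr.length
    · rw [bLoop, dif_pos hi, W, dif_pos hi]
      have hge := runJ_ge arr i i
      show (if V arr i = true then _ else _) = _
      by_cases hv : V arr i
      · rw [if_pos hv, if_pos hv]
        rcases hc with rfl | rfl
        · show (if (((0:Int) + 1) == 2) = true then "NO"
              else bLoop arr (0 + 1) (runJ arr i i + 1)) = _
          rw [if_neg (by decide)]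
          rw [ih (runJ arr i i + 1) (0 + 1) (by omega) (Or.inr (by ring))]
          push_cast
          norm_num
        · show (if (((1:Int) + 1) == 2) = true then "NO"
              else bLoop arr (1 + 1) (runJ arr i i + 1)) = _
          rw [if_pos (by decide)]
          rw [if_pos (by push_cast; omega)]
      · rw [if_neg hv, if_neg hv]
        have hge := runJ_ge arr i i
        rw [ih (runJ arr i i + 1) c (by omega) hc]
        simp
    · rw [bLoop, dif_neg hi, W, dif_neg hi]
      rcases hc with rfl | rfl <;> simp

theorem B_eq (arr : List Int) :
    solve_alt arr = if C arr 0 = 1 then "YES" else "NO" := by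
  unfold solve_alt
  rw [bLoop_eq arr arr.length 0 0 (by omega) (Or.inl rfl)]
  rw [W_eq_C arr arr.length 0 (by omega)]
  by_cases h : C arr 0 = 1
  · rw [if_pos h, h]
    norm_num
  · rw [if_neg h]
    rcases Nat.lt_or_ge (C arr 0) 1 with h1 | h1
    · have h0 : C arr 0 = 0 := by omega
      rw [h0]
      norm_num
    · have h2 : 2 ≤ C arr 0 := by omega
      rw [if_pos (by omega)]

-- the body of A's big if-condition, as the port writes it
def Q (arr : List Int) (n l r : Int) : Bool :=
  ((decide (l ≤ r) && decide (r ≤ n - 1)) && allSame arr l r)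
    && (l == 0 || decide (PySem.List.pyGetD arr (l - 1) 0 > PySem.List.pyGetD arr l 0))
    && (r == n - 1 || decide (PySem.List.pyGetD arr r 0 < PySem.List.pyGetD arr (r + 1) 0))

theorem allSame_iff (arr : List Int) (L R : Nat) (hLR : L ≤ R) (hR : R < arr.length) :
    (allSame arr (L : Int) (R : Int) = true ↔
      ∀ k, L ≤ k → k ≤ R → arr.getD k 0 = arr.getD L 0) := by
  have hs : PySem.List.slice arr (some (L : Int)) (some ((R : Int) + 1)) =
      (arr.drop L).take (R + 1 - L) := by
    have h1 : ((R : Int) + 1) = ((R + 1 : Nat) : Int) := by push_cast; ring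
    rw [h1, PySem.List.slice_natCast]
  have hmem : ∀ e ∈ (arr.drop L).take (R + 1 - L), ∃ k, L ≤ k ∧ k ≤ R ∧ arr.getD k 0 = e := by
    intro e he
    rw [List.mem_iff_getElem] at he
    obtain ⟨m, hm, hme⟩ := he
    have hmlen : m < arr.length - L := by
      have := List.length_take_le (R + 1 - L) (arr.drop L)
      have h2 := List.length_drop (l := arr) (i := L)
      have h3 : m < (arr.drop L).length := by
        have := List.length_take (i := R + 1 - L) (l := arr.drop L)
        omega
      omega
    have hm2 : m < R + 1 - L := by
      have := List.length_take (i := R + 1 - L) (l := arr.drop L)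
      omega
    refine ⟨L + m, by omega, by omega, ?_⟩
    rw [List.getD_eq_getElem arr 0 (by omega)]
    rw [List.getElem_take, List.getElem_drop] at hme
    exact hme
  have hget : ∀ k, L ≤ k → k ≤ R → arr.getD k 0 ∈ (arr.drop L).take (R + 1 - L) := by
    intro k hk1 hk2
    rw [List.mem_iff_getElem]
    refine ⟨k - L, ?_, ?_⟩
    · rw [List.length_take, List.length_drop]
      omega
    · rw [List.getElem_take, List.getElem_drop]
      rw [List.getD_eq_getElem arr 0 (by omega)]
      congr 1
      omega
  have hel : PySem.List.pyGetD arr (L : Int) 0 = arr.getD L 0 := by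
    simp [PySem.List.pyGetD_natCast, List.getD]
  unfold allSame
  rw [hs]
  split
  · rename_i hlen
    simp only [true_iff]
    have h1 : ((arr.drop L).take (R + 1 - L)).length = 1 := by simpa using hlen
    rw [List.length_take, List.length_drop] at h1
    have hRL : R = L := by omega
    intro k hk1 hk2
    have : k = L := by omega
    subst this
    rfl
  · rw [List.all_eq_true]
    constructor
    · intro hall k hk1 hk2
      have := hall _ (hget k hk1 hk2)
      rw [hel] at this
      exact eq_of_beq this
    · intro hall e he
      obtain ⟨k, hk1, hk2, hke⟩ := hmem e he
      rw [hel, ← hke]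
      exact beq_iff_eq.mpr (hall k hk1 hk2)

theorem Q_true_iff (arr : List Int) (L R : Nat) (hLR : L ≤ R) (hR : R < arr.length) :
    (Q arr (arr.length : Int) (L : Int) (R : Int) = true ↔
      (V arr L = true ∧ R = runJ arr L L)) := by
  have hL : L < arr.length := by omega
  have hE1 : L ≤ runJ arr L L := runJ_ge arr L L
  have hE2 : runJ arr L L < arr.length := runJ_lt arr L L hL
  have hgR : PySem.List.pyGetD arr (R : Int) 0 = arr.getD R 0 := by
    simp [PySem.List.pyGetD_natCast, List.getD]
  have hgR1 : PySem.List.pyGetD arr ((R : Int) + 1) 0 = arr.getD (R + 1) 0 := by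
    have h1 : ((R : Int) + 1) = ((R + 1 : Nat) : Int) := by push_cast; ring
    rw [h1, PySem.List.pyGetD_natCast]
  have hgE : PySem.List.pyGetD arr (runJ arr L L : Int) 0 = arr.getD (runJ arr L L) 0 := by
    simp [PySem.List.pyGetD_natCast, List.getD]
  have hgE1 : PySem.List.pyGetD arr ((runJ arr L L : Int) + 1) 0 = arr.getD (runJ arr L L + 1) 0 := by
    have h1 : ((runJ arr L L : Int) + 1) = ((runJ arr L L + 1 : Nat) : Int) := by push_cast; ring
    rw [h1, PySem.List.pyGetD_natCast]
  -- left condition of Q at l = ↑L equals left condition of V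
  have hleft : ((L : Int) == 0 || decide (PySem.List.pyGetD arr ((L : Int) - 1) 0 > PySem.List.pyGetD arr (L : Int) 0))
      = ((L == 0) || decide (arr.getD (L - 1) 0 > arr.getD L 0)) := by
    by_cases h0 : L = 0
    · subst h0; simp
    · have e1 : ((L : Int) == 0) = false := by simp; omega
      have e2 : (L == 0) = false := by simp; omega
      rw [e1, e2]
      have h1 : ((L : Int) - 1) = ((L - 1 : Nat) : Int) := by omega
      rw [h1]
      simp [PySem.List.pyGetD_natCast, List.getD]
  unfold Q V
  rw [hleft]
  constructor
  · intro h
    simp only [Bool.and_eq_true, Bool.or_eq_true, decide_eq_true_eq, beq_iff_eq] at h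
    obtain ⟨⟨⟨⟨_, _⟩, hAS⟩, hlft⟩, hrgt⟩ := h
    rw [allSame_iff arr L R hLR hR] at hAS
    have hRE : R = runJ arr L L := by
      have hRle : R ≤ runJ arr L L := runJ_max arr L L R hLR hR hAS
      rcases Nat.eq_or_lt_of_le hRle with h | h
      · exact h
      · exfalso
        rcases hrgt with h1 | h1
        · have : (R : Int) = ((arr.length - 1 : Nat) : Int) := by
            rw [h1]; omega
          have : R = arr.length - 1 := by exact_mod_cast this
          omega
        · rw [hgR, hgR1] at h1
          have e1 : arr.getD R 0 = arr.getD L 0 := hAS R hLR (le_refl R)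
          have e2 : arr.getD (R + 1) 0 = arr.getD L 0 :=
            runJ_all arr L L rfl (R + 1) (by omega) (by omega)
          rw [e1, e2] at h1
          exact lt_irrefl _ h1
    refine ⟨?_, hRE⟩
    simp only [Bool.and_eq_true, Bool.or_eq_true, decide_eq_true_eq, beq_iff_eq]
    refine ⟨hlft, ?_⟩
    rw [← hRE]
    rcases hrgt with h1 | h1
    · left
      have h2 : (R : Int) = ((arr.length - 1 : Nat) : Int) := by rw [h1]; omega
      exact_mod_cast h2
    · right
      rw [hgR, hgR1] at h1
      exact h1
  · intro ⟨hv, hRE⟩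
    simp only [Bool.and_eq_true, Bool.or_eq_true, decide_eq_true_eq, beq_iff_eq] at hv ⊢
    obtain ⟨hlft, hrgt⟩ := hv
    rw [← hRE] at hrgt
    refine ⟨⟨⟨⟨by exact_mod_cast hLR, by omega⟩, ?_⟩, hlft⟩, ?_⟩
    · rw [allSame_iff arr L R hLR hR]
      intro k hk1 hk2
      rw [hRE] at hk2
      exact runJ_all arr L L rfl k hk1 (by omega)
    · rcases hrgt with h1 | h1
      · left
        have h2 : (R : Int) = ((arr.length - 1 : Nat) : Int) := by exact_mod_cast congrArg Nat.cast h1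
        omega
      · right
        rw [hgR, hgR1]
        exact h1

theorem foldl_keep_error {α : Type} (g : Int → α → Except String Int) (rs : List α) (s : String) :
    rs.foldl (fun st r => match st with
      | Except.error s' => Except.error s'
      | Except.ok c => g c r) (.error s) = .error s := by
  induction rs with
  | nil => rfl
  | cons r rs ih => rw [List.foldl_cons]; exact ih

theorem inner_fold (q : Int → Bool) : ∀ (rs : List Int) (c : Int), c = 0 ∨ c = 1 →
    rs.foldl (fun st r => match st with
      | Except.error s => Except.error s
      | Except.ok c => if q r then (if c == 1 then Except.error "NO" else Except.ok (c + 1)) else Except.ok c) (.ok c)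
    = if 2 ≤ c + ((rs.filter q).length : Int) then Except.error "NO"
      else Except.ok (c + ((rs.filter q).length : Int)) := by
  intro rs
  induction rs with
  | nil =>
    intro c hc
    rcases hc with rfl | rfl <;> simp
  | cons r rs ih =>
    intro c hc
    by_cases hq : q r = true
    · rcases hc with rfl | rfl
      · rw [List.foldl_cons]
        show rs.foldl _ (if q r = true then (if ((0 : Int) == 1) = true then Except.error "NO" else Except.ok (0 + 1)) else Except.ok 0) = _
        rw [if_pos hq, if_neg (by decide)]
        rw [ih (0 + 1) (Or.inr (by ring))]
        rw [List.filter_cons, if_pos hq]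
        simp only [List.length_cons]
        by_cases h2 : 2 ≤ ((rs.filter q).length : Nat) + 1
        · rw [if_pos (by push_cast; omega), if_pos (by push_cast; omega)]
        · rw [if_neg (by push_cast; omega), if_neg (by push_cast; omega)]
          congr 1
          push_cast
          ring
      · rw [List.foldl_cons]
        show rs.foldl _ (if q r = true then (if ((1 : Int) == 1) = true then Except.error "NO" else Except.ok (1 + 1)) else Except.ok 1) = _
        rw [if_pos hq, if_pos (by decide)]
        rw [List.filter_cons, if_pos hq]
        rw [if_pos (by simp; omega)]
        exact foldl_keep_error _ rs "NO"
    · rw [List.foldl_cons]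
      show rs.foldl _ (if q r = true then (if (c == 1) = true then Except.error "NO" else Except.ok (c + 1)) else Except.ok c) = _
      rw [if_neg hq]
      rw [List.filter_cons, if_neg hq]
      exact ih c hc

theorem Q_count (arr : List Int) (L : Nat) (hL : L < arr.length) :
    ((PySem.List.pyRange (L : Int) (arr.length : Int) 1).filter
        (fun r => Q arr (arr.length : Int) (L : Int) r)).length
      = if V arr L then 1 else 0 := by
  have hE1 : L ≤ runJ arr L L := runJ_ge arr L L
  have hE2 : runJ arr L L < arr.length := runJ_lt arr L L hL
  have hiff : ∀ r ∈ PySem.List.pyRange (L : Int) (arr.length : Int) 1,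
      (Q arr (arr.length : Int) (L : Int) r = true ↔
        (V arr L = true ∧ r = (runJ arr L L : Int))) := by
    intro r hr
    rw [PySem.List.mem_pyRange_one] at hr
    obtain ⟨R, rfl⟩ := Int.eq_ofNat_of_zero_le (le_trans (Int.natCast_nonneg L) hr.1)
    have hLR : L ≤ R := by exact_mod_cast hr.1
    have hR : R < arr.length := by exact_mod_cast hr.2
    rw [Q_true_iff arr L R hLR hR]
    constructor
    · rintro ⟨hv, he⟩; exact ⟨hv, by exact_mod_cast he⟩
    · rintro ⟨hv, he⟩; exact ⟨hv, by exact_mod_cast he⟩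
  by_cases hv : V arr L
  · rw [if_pos hv]
    have hcongr : (PySem.List.pyRange (L : Int) (arr.length : Int) 1).filter
          (fun r => Q arr (arr.length : Int) (L : Int) r)
        = (PySem.List.pyRange (L : Int) (arr.length : Int) 1).filter
          (fun r => r == (runJ arr L L : Int)) := by
      apply List.filter_congr
      intro r hr
      have := hiff r hr
      by_cases hq : Q arr (arr.length : Int) (L : Int) r = true
      · rw [hq]
        have := (this.mp hq).2
        simp [this]
      · rw [Bool.eq_false_iff.mpr hq]
        have : ¬ r = (runJ arr L L : Int) := fun he => hq (this.mpr ⟨hv, he⟩)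
        simp [this]
    rw [hcongr]
    have hmem : ((runJ arr L L : Nat) : Int) ∈ PySem.List.pyRange (L : Int) (arr.length : Int) 1 := by
      rw [PySem.List.mem_pyRange_one]
      constructor <;> exact_mod_cast (by omega : _ )
    have hnd : (PySem.List.pyRange (L : Int) (arr.length : Int) 1).Nodup :=
      PySem.List.nodup_pyRange_one _ _
    rw [← List.count_eq_length_filter]
    exact List.count_eq_one_of_mem hnd hmem
  · rw [if_neg hv]
    rw [List.length_eq_zero_iff.mpr]
    rw [List.filter_eq_nil_iff]
    intro r hr
    simp only [Bool.not_eq_true]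
    rw [Bool.eq_false_iff]
    intro hq
    exact hv ((hiff r hr).mp hq).1

theorem outer_fold (arr : List Int) : ∀ (ls : List Int),
    (∀ l ∈ ls, ∃ L : Nat, l = (L : Int) ∧ L < arr.length) →
    ∀ c : Int, c = 0 ∨ c = 1 →
    ls.foldl (fun st l => match st with
      | Except.error s => Except.error s
      | Except.ok count =>
        (PySem.List.pyRange l (arr.length : Int) 1).foldl (fun st2 r => match st2 with
          | Except.error s => Except.error s
          | Except.ok c => if Q arr (arr.length : Int) l r then
              (if c == 1 then Except.error "NO" else Except.ok (c + 1))
            else Except.ok c) (Except.ok count)) (Except.ok c)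
    = if 2 ≤ c + ((ls.filter (fun l => V arr l.toNat)).length : Int) then Except.error "NO"
      else Except.ok (c + ((ls.filter (fun l => V arr l.toNat)).length : Int)) := by
  intro ls
  induction ls with
  | nil =>
    intro _ c hc
    rcases hc with rfl | rfl <;> simp
  | cons l ls ih =>
    intro hmem c hc
    obtain ⟨L, rfl, hL⟩ := hmem l (List.mem_cons_self)
    have hmem' : ∀ l ∈ ls, ∃ L : Nat, l = (L : Int) ∧ L < arr.length :=
      fun l hl => hmem l (List.mem_cons_of_mem _ hl)
    rw [List.foldl_cons]
    show ls.foldl _ ((PySem.List.pyRange (L : Int) (arr.length : Int) 1).foldl _ (Except.ok c)) = _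
    rw [inner_fold _ _ c hc, Q_count arr L hL, List.filter_cons]
    have htn : ((L : Int)).toNat = L := Int.toNat_natCast L
    by_cases hv : V arr L
    · rw [if_pos hv]
      have hvt : (V arr ((L : Int)).toNat) = true := by rw [htn]; exact hv
      rw [if_pos hvt, List.length_cons]
      set X := (ls.filter (fun l => V arr l.toNat)).length with hX
      rcases hc with rfl | rfl
      · rw [if_neg (show ¬ ((2:Int) ≤ 0 + ((1:Nat):Int)) by norm_num)]
        have e2 : (0:Int) + ((1:Nat):Int) = 0 + 1 := by norm_num
        rw [e2]
        rw [ih hmem' (0 + 1) (Or.inr (by ring))]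
        by_cases h2 : 2 ≤ X + 1
        · rw [if_pos (show (2:Int) ≤ 0 + 1 + (X:Int) by push_cast; omega),
            if_pos (show (2:Int) ≤ 0 + ((X + 1 : Nat):Int) by push_cast; omega)]
        · rw [if_neg (show ¬ ((2:Int) ≤ 0 + 1 + (X:Int)) by push_cast; omega),
            if_neg (show ¬ ((2:Int) ≤ 0 + ((X + 1 : Nat):Int)) by push_cast; omega)]
          congr 1
          push_cast
          ring
      · rw [if_pos (show (2:Int) ≤ 1 + ((1:Nat):Int) by norm_num)]
        rw [if_pos (show (2:Int) ≤ 1 + ((X + 1 : Nat):Int) by push_cast; omega)]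
        exact foldl_keep_error _ ls "NO"
    · rw [if_neg hv]
      have hvt : ¬ (V arr ((L : Int)).toNat) = true := by rw [htn]; exact hv
      rw [if_neg hvt]
      rw [if_neg (show ¬ ((2:Int) ≤ c + ((0:Nat):Int)) by rcases hc with rfl | rfl <;> norm_num)]
      have e2 : c + ((0:Nat):Int) = c := by norm_num
      rw [e2]
      exact ih hmem' c hc

theorem C_one_of_len_one (arr : List Int) (h1 : arr.length = 1) : C arr 0 = 1 := by
  have hr : runJ arr 0 0 = 0 := by
    rw [runJ, dif_neg]
    rw [h1]
    omega
  have hv : V arr 0 = true := by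
    unfold V
    rw [hr, h1]
    simp
  unfold C
  rw [h1]
  simp [hv]

theorem A_eq (arr : List Int) : solve arr = if C arr 0 = 1 then "YES" else "NO" := by
  by_cases h1 : arr.length = 1
  · unfold solve
    rw [if_pos (by simp [h1]), C_one_of_len_one arr h1]
    rfl
  · unfold solve
    rw [if_neg (by simp [h1])]
    have hcondQ : ∀ (n l r : Int),
        (((decide (l ≤ r) && decide (r ≤ n - 1)) && allSame arr l r)
          && (l == 0 || decide (PySem.List.pyGetD arr (l - 1) 0 > PySem.List.pyGetD arr l 0))
          && (r == n - 1 || decide (PySem.List.pyGetD arr r 0 < PySem.List.pyGetD arr (r + 1) 0)))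
        = Q arr n l r := fun _ _ _ => rfl
    simp only [hcondQ]
    have hmem : ∀ l ∈ PySem.List.pyRange 0 (arr.length : Int) 1,
        ∃ L : Nat, l = (L : Int) ∧ L < arr.length := by
      intro l hl
      rw [PySem.List.mem_pyRange_one] at hl
      obtain ⟨L, rfl⟩ := Int.eq_ofNat_of_zero_le hl.1
      exact ⟨L, rfl, by exact_mod_cast hl.2⟩
    rw [outer_fold arr _ hmem 0 (Or.inl rfl)]
    have hflt : ((PySem.List.pyRange 0 (arr.length : Int) 1).filter
        (fun l => V arr l.toNat)).length = C arr 0 := by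
      rw [PySem.List.pyRange_one]
      have h0 : ((arr.length : Int) - 0).toNat = arr.length := by omega
      rw [h0]
      rw [List.filter_map]
      rw [List.length_map]
      unfold C
      rw [List.range_eq_range']
      congr 1
      · apply List.filter_congr
        intro L _
        simp
    rw [hflt]
    by_cases h2 : 2 ≤ C arr 0
    · rw [if_pos (by omega)]
      show "NO" = _
      rw [if_neg (by omega)]
    · rw [if_neg (by omega)]
      show (if ((0 : Int) + (C arr 0 : Int) == 0) = true then "NO" else "YES") = _
      rcases Nat.lt_or_ge (C arr 0) 1 with h3 | h3
      · have h0 : C arr 0 = 0 := by omega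
        rw [h0]
        norm_num
      · have h0 : C arr 0 = 1 := by omega
        rw [h0]
        norm_num

-- ===== VERDICT (by name: the statement is the Claim_ definition above) =====
theorem solve_spec : Claim_equal_solve := by
  unfold Claim_equal_solve Spec_solve
  intro arr _
  rw [A_eq, B_eq]
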